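-- pv_equiv track=rewrite | github.com/imdrewsf/Hubitat_Tile_Mover | hubitat_tile_mover/ops_spacing.py | _components_1d
-- ===== SOURCE A (Python) =====
-- from typing import Any, Dict, List, Tuple, DefaultDict
--
-- def _components_1d(intervals: List[Tuple[int, int]]) -> List[List[int]]:
--     """Connected components of overlapping inclusive intervals. Returns lists of indices."""
--     order = sorted(range(len(intervals)), key=lambda i: (intervals[i][0], intervals[i][1], i))
--     comps: List[List[int]] = []
--     cur: List[int] = []
--     cur_end = None
--     for i in order:
--         a, b = intervals[i]
--         if cur_end is None:
--             cur = [i]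
--             cur_end = b
--             continue
--         if a <= cur_end:
--             cur.append(i)
--             cur_end = max(cur_end, b)
--         else:
--             comps.append(cur)
--             cur = [i]
--             cur_end = b
--     if cur_end is not None:
--         comps.append(cur)
--     return comps
-- ===== SOURCE B (Python) =====
-- from typing import List, Tuple
--
-- def _components_1d(intervals: List[Tuple[int, int]]) -> List[List[int]]:
--     """Connected components of overlapping inclusive intervals. Returns lists of indices."""
--     # Union-find over sorted positions: chain-union each position overlapping the
--     # running max end with its predecessor, then group positions by their root.
--     n = len(intervals)
--     order = sorted(range(n), key=lambda i: (intervals[i][0], intervals[i][1], i))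
--     parent = list(range(n))  # over sorted positions; parent[k] <= k always
--
--     def find(k):
--         while parent[k] != k:
--             k = parent[k]
--         return k
--
--     run_end = None
--     for k, i in enumerate(order):
--         a, b = intervals[i]
--         if run_end is not None and a <= run_end:
--             parent[find(k)] = find(k - 1)
--             run_end = max(run_end, b)
--         else:
--             run_end = b
--
--     comps: List[List[int]] = []
--     last = -1
--     for k, i in enumerate(order):
--         r = find(k)
--         if not comps or r != last:
--             comps.append([i])
--         else:
--             comps[-1].append(i)
--         last = r
--     return comps
-- ===== Notes on version B (the rewrite author's own statement) =====
-- stated objective: alternative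
-- what changed: Instead of A's single sweep that accumulates comps/cur/cur_end with a trailing flush, B builds a disjoint-set parent array over the sorted positions, unions each position that overlaps the running end with its predecessor, and then produces the components in a second pass by grouping sorted positions that share the same find-root.
import Mathlib
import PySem

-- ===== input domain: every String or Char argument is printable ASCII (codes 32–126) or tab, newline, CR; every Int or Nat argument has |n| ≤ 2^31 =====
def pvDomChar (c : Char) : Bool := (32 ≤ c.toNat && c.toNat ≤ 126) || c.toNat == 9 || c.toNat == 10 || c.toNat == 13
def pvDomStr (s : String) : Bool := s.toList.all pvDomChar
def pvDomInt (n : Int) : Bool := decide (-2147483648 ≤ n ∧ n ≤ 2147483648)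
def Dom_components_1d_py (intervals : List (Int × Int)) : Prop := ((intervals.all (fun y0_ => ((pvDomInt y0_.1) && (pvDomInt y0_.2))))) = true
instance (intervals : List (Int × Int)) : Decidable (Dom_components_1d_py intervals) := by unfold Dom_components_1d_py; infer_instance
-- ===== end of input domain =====

-- B replaces A's single sweep with running state by a union-find (parent array over
-- sorted positions): chain-union overlapping neighbours, then group positions by root
-- (objective: alternative data structure, same asymptotic cost).

-- ===== PORT A =====
-- Python tuple keys (intervals[i][0], intervals[i][1], i) compare lexicographically:
-- modelled exactly by the lexicographic product order ×ₗ.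
-- intervals[i] with i drawn from range(len(intervals)) is always in range, so the
-- pyGetD default (0, 0) is never read.
def aKey (intervals : List (Int × Int)) (i : Int) : Int ×ₗ (Int ×ₗ Int) :=
  toLex ((PySem.List.pyGetD intervals i (0, 0)).1,
    toLex ((PySem.List.pyGetD intervals i (0, 0)).2, i))

-- the body of A's for-loop: state = (comps, cur, cur_end)
def aStep (intervals : List (Int × Int))
    (st : List (List Int) × List Int × Option Int) (i : Int) :
    List (List Int) × List Int × Option Int :=
  let ab := PySem.List.pyGetD intervals i (0, 0)
  match st.2.2 with
  | none => (st.1, [i], some ab.2)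
  | some e =>
    if ab.1 ≤ e then (st.1, st.2.1 ++ [i], some (max e ab.2))
    else (st.1 ++ [st.2.1], [i], some ab.2)

-- the trailing 'if cur_end is not None: comps.append(cur)'
def aFinish (st : List (List Int) × List Int × Option Int) : List (List Int) :=
  match st.2.2 with
  | none => st.1
  | some _ => st.1 ++ [st.2.1]

def components_1d_py (intervals : List (Int × Int)) : List (List Int) :=
  aFinish ((PySem.List.sorted (PySem.List.pyRange 0 (PySem.List.len intervals))
      (aKey intervals)).foldl (aStep intervals) ([], [], none))

-- ===== PORT B =====
-- same sort key as the Python: sorted(range(n), key=lambda i: (intervals[i][0], intervals[i][1], i))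
def bKey (intervals : List (Int × Int)) (i : Int) : Int ×ₗ (Int ×ₗ Int) :=
  toLex ((PySem.List.pyGetD intervals i (0, 0)).1,
    toLex ((PySem.List.pyGetD intervals i (0, 0)).2, i))

-- find's while loop 'while parent[k] != k: k = parent[k]' ported with fuel = len(parent);
-- the Python loop terminates because parent[k] <= k always, and any strictly decreasing
-- chain of list positions has length <= len(parent), so the fuel is never exhausted.
def bFindAux (parent : List Int) : Nat → Int → Int
  | 0, k => k
  | f + 1, k =>
    let p := PySem.List.pyGetD parent k 0
    if p ≠ k then bFindAux parent f p else k

def bFind (parent : List Int) (k : Int) : Int := bFindAux parent parent.length k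

-- body of the union loop: state = (parent, run_end), item = (k, i) from enumerate(order)
def bUnionStep (intervals : List (Int × Int))
    (st : List Int × Option Int) (ki : Int × Int) : List Int × Option Int :=
  let ab := PySem.List.pyGetD intervals ki.2 (0, 0)
  match st.2 with
  | none => (st.1, some ab.2)
  | some e =>
    if ab.1 ≤ e then
      (PySem.List.pySetD st.1 (bFind st.1 ki.1) (bFind st.1 (ki.1 - 1)), some (max e ab.2))
    else (st.1, some ab.2)

-- body of the grouping loop: state = (comps, last), item = (k, i) from enumerate(order)
def bGroupStep (parent : List Int)
    (st : List (List Int) × Int) (ki : Int × Int) : List (List Int) × Int :=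
  let r := bFind parent ki.1
  if st.1 = [] ∨ r ≠ st.2 then (st.1 ++ [[ki.2]], r)
  else (st.1.dropLast ++ [PySem.List.pyGetD st.1 (-1) [] ++ [ki.2]], r)

def components_1d_py_alt (intervals : List (Int × Int)) : List (List Int) :=
  let order := PySem.List.sorted (PySem.List.pyRange 0 (PySem.List.len intervals))
    (bKey intervals)
  let parent0 := PySem.List.pyRange 0 (PySem.List.len intervals)
  let st := (PySem.List.enumerate order).foldl (bUnionStep intervals) (parent0, none)
  ((PySem.List.enumerate order).foldl (bGroupStep st.1) ([], -1)).1

-- ===== PRECONDITION & SPEC =====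
def Spec_components_1d_py (intervals : List (Int × Int)) (out : List (List Int)) : Prop := out = components_1d_py_alt intervals
instance (intervals : List (Int × Int)) (out : List (List Int)) : Decidable (Spec_components_1d_py intervals out) := by unfold Spec_components_1d_py; infer_instance

-- ===== CLAIM (what is proved, stated in full; the proofs are below) =====
def Claim_equal_components_1d_py : Prop := ∀ (intervals : List (Int × Int)), Dom_components_1d_py intervals → Spec_components_1d_py intervals (components_1d_py intervals)

-- ===== LEMMAS AND PROOFS =====

-- the decoration of index i with its interval
def dTriple (intervals : List (Int × Int)) (i : Int) : Int × Int × Int :=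
  ((PySem.List.pyGetD intervals i (0, 0)).1, (PySem.List.pyGetD intervals i (0, 0)).2, i)

-- A's loop body re-read on decorated triples
def tStep (st : List (List Int) × List Int × Option Int) (t : Int × Int × Int) :
    List (List Int) × List Int × Option Int :=
  match st.2.2 with
  | none => (st.1, [t.2.2], some t.2.1)
  | some e =>
    if t.1 ≤ e then (st.1, st.2.1 ++ [t.2.2], some (max e t.2.1))
    else (st.1 ++ [st.2.1], [t.2.2], some t.2.1)

-- reference decomposition: maximal overlapping runs of the sorted triples
def altSpan (e : Int) : List (Int × Int × Int) → List Int × List (Int × Int × Int) × Int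
  | [] => ([], [], e)
  | (a, b, j) :: rest =>
    if a ≤ e then
      let r := altSpan (max e b) rest
      (j :: r.1, r.2.1, r.2.2)
    else ([], (a, b, j) :: rest, e)

theorem altSpan_rest_length (e : Int) (l : List (Int × Int × Int)) :
    (altSpan e l).2.1.length ≤ l.length := by
  induction l generalizing e with
  | nil => simp [altSpan]
  | cons t rest ih =>
    obtain ⟨a, b, j⟩ := t
    simp only [altSpan]
    split
    · exact le_trans (ih (max e b)) (Nat.le_succ _)
    · simp

def altGo : List (Int × Int × Int) → List (List Int)
  | [] => []
  | (_, b, i) :: rest =>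
    (i :: (altSpan b rest).1) :: altGo (altSpan b rest).2.1
  termination_by l => l.length
  decreasing_by
    simp only [List.length_cons]
    exact Nat.lt_succ_of_le (altSpan_rest_length b rest)

-- run starts: rsAux k s e rest lists, for each remaining sorted position k+m, the start
-- position of the run containing it (s = start of the current run, e = its running end)
def rsAux (k s : Nat) (e : Int) : List (Int × Int × Int) → List Int
  | [] => []
  | t :: rest =>
    if t.1 ≤ e then (s : Int) :: rsAux (k + 1) s (max e t.2.1) rest
    else (k : Int) :: rsAux (k + 1) k t.2.1 rest

-- B's two loop bodies re-read on decorated triples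
def uStep (st : List Int × Option Int) (kt : Int × (Int × Int × Int)) :
    List Int × Option Int :=
  match st.2 with
  | none => (st.1, some kt.2.2.1)
  | some e =>
    if kt.2.1 ≤ e then
      (PySem.List.pySetD st.1 (bFind st.1 kt.1) (bFind st.1 (kt.1 - 1)), some (max e kt.2.2.1))
    else (st.1, some kt.2.2.1)

def gStep (parent : List Int) (st : List (List Int) × Int) (kt : Int × (Int × Int × Int)) :
    List (List Int) × Int :=
  let r := bFind parent kt.1
  if st.1 = [] ∨ r ≠ st.2 then (st.1 ++ [[kt.2.2.2]], r)
  else (st.1.dropLast ++ [PySem.List.pyGetD st.1 (-1) [] ++ [kt.2.2.2]], r)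

theorem enumerate_map_pv {α β : Type} (f : α → β) (xs : List α) (s : Int) :
    PySem.List.enumerate (xs.map f) s = (PySem.List.enumerate xs s).map (fun p => (p.1, f p.2)) := by
  induction xs generalizing s with
  | nil => simp [PySem.List.enumerate_nil]
  | cons x xs ih => simp [PySem.List.enumerate_cons, ih]

theorem fold_eq_tStep (intervals : List (Int × Int)) (order : List Int) (init) :
    order.foldl (aStep intervals) init
      = (order.map (dTriple intervals)).foldl tStep init := by
  rw [List.foldl_map]
  apply PySem.List.foldl_congr_mem
  intro acc i _
  rfl

theorem main_loop (L : List (Int × Int × Int))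
    (comps : List (List Int)) (cur : List Int) (e : Int) :
    aFinish (L.foldl tStep (comps, cur, some e))
      = comps ++ ((cur ++ (altSpan e L).1) :: altGo (altSpan e L).2.1) := by
  induction L generalizing comps cur e with
  | nil => simp [aFinish, altSpan, altGo]
  | cons t rest ih =>
    obtain ⟨a, b, j⟩ := t
    simp only [List.foldl_cons, tStep, altSpan]
    by_cases h : a ≤ e
    · simp only [if_pos h]
      rw [ih]
      simp
    · simp only [if_neg h]
      rw [ih]
      simp [altGo]

-- B's union fold = uStep fold over enumerated triples
theorem union_fold_eq (intervals : List (Int × Int)) (order : List Int) (init) :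
    (PySem.List.enumerate order).foldl (bUnionStep intervals) init
      = (PySem.List.enumerate (order.map (dTriple intervals))).foldl uStep init := by
  rw [enumerate_map_pv, List.foldl_map]
  apply PySem.List.foldl_congr_mem
  intro acc p _
  rfl

theorem group_fold_eq (P : List Int) (intervals : List (Int × Int)) (order : List Int) (init) :
    (PySem.List.enumerate order).foldl (bGroupStep P) init
      = (PySem.List.enumerate (order.map (dTriple intervals))).foldl (gStep P) init := by
  rw [enumerate_map_pv, List.foldl_map]
  apply PySem.List.foldl_congr_mem
  intro acc p _
  rfl

theorem bFindAux_fix (P : List Int) (v : Int) (h : PySem.List.pyGetD P v 0 = v) :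
    ∀ f : Nat, 1 ≤ f → bFindAux P f v = v := by
  intro f hf
  obtain ⟨f', rfl⟩ : ∃ f', f = f' + 1 := ⟨f - 1, by omega⟩
  simp [bFindAux, h]

theorem bFind_self (P : List Int) (j : Int) (h : PySem.List.pyGetD P j 0 = j)
    (hl : 1 ≤ P.length) : bFind P j = j := by
  unfold bFind
  exact bFindAux_fix P j h P.length hl

theorem bFind_two (P : List Int) (j v : Int) (h1 : PySem.List.pyGetD P j 0 = v)
    (hne : v ≠ j) (h2 : PySem.List.pyGetD P v 0 = v) (hl : 2 ≤ P.length) :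
    bFind P j = v := by
  unfold bFind
  obtain ⟨f, hf⟩ : ∃ f, P.length = f + 2 := ⟨P.length - 2, by omega⟩
  rw [hf]
  show bFindAux P (f + 1 + 1) j = v
  simp only [bFindAux, h1, if_pos hne]
  exact bFindAux_fix P v h2 (f + 1) (by omega)

-- invariant of the union loop: after processing the remaining positions, each processed
-- position's parent is the start of its run, and run starts stay their own parents
theorem union_inv (rest : List (Int × Int × Int)) :
    ∀ (k s : Nat) (e : Int) (P : List Int),
    1 ≤ k → k + rest.length ≤ P.length → s < k →
    P.getD s 0 = s → P.getD (k - 1) 0 = s →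
    (∀ j : Nat, k ≤ j → j < P.length → P.getD j 0 = j) →
    ((PySem.List.enumerate rest (k : Int)).foldl uStep (P, some e)).1.length = P.length ∧
    (∀ j : Nat, j < k →
      ((PySem.List.enumerate rest (k : Int)).foldl uStep (P, some e)).1.getD j 0 = P.getD j 0) ∧
    (∀ m : Nat, m < rest.length →
      ((PySem.List.enumerate rest (k : Int)).foldl uStep (P, some e)).1.getD (k + m) 0
        = (rsAux k s e rest).getD m 0) ∧
    (∀ m : Nat, m < rest.length →
      ∃ v : Nat, (rsAux k s e rest).getD m 0 = (v : Int) ∧ v ≤ k + m ∧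
        ((PySem.List.enumerate rest (k : Int)).foldl uStep (P, some e)).1.getD v 0 = v) := by
  induction rest with
  | nil =>
    intro k s e P _ _ _ _ _ _
    simp [PySem.List.enumerate_nil]
  | cons t rest ih =>
    intro k s e P hk hlen hsk hPs hPk1 hHigh
    obtain ⟨a, b, i⟩ := t
    have hkP : k < P.length := by simp at hlen; omega
    rw [PySem.List.enumerate_cons, List.foldl_cons]
    rw [show ((k : Int) + 1) = ((k + 1 : Nat) : Int) by push_cast; ring]
    by_cases h : a ≤ e
    · -- overlapping: union position k with the current run start s
      have hfk : bFind P (k : Int) = (k : Int) := by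
        apply bFind_self
        · rw [PySem.List.pyGetD_natCast]
          exact hHigh k le_rfl hkP
        · omega
      have hfk1 : bFind P ((k : Int) - 1) = (s : Int) := by
        rw [show ((k : Int) - 1) = ((k - 1 : Nat) : Int) by omega]
        by_cases hsk1 : s = k - 1
        · subst hsk1
          exact bFind_self P _ (by rw [PySem.List.pyGetD_natCast]; exact hPk1) (by omega)
        · apply bFind_two P _ _ _ _ _ (by omega)
          · rw [PySem.List.pyGetD_natCast]; exact hPk1
          · intro hc
            exact hsk1 (Int.ofNat_inj.mp hc)
          · rw [PySem.List.pyGetD_natCast]; exact hPs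
      have hstep : uStep (P, some e) ((k : Int), (a, b, i))
          = (P.set k (s : Int), some (max e b)) := by
        simp [uStep, h, hfk, hfk1, PySem.List.pySetD_natCast]
      rw [hstep]
      have hget : ∀ j : Nat, j ≠ k → (P.set k (s : Int)).getD j 0 = P.getD j 0 := by
        intro j hj
        simp [List.getD_eq_getElem?_getD, List.getElem?_set_ne (Ne.symm hj)]
      have hgetk : (P.set k (s : Int)).getD k 0 = (s : Int) := by
        simp [List.getD_eq_getElem?_getD, hkP]
      obtain ⟨ih1, ih2, ih3, ih4⟩ := ih (k + 1) s (max e b) (P.set k (s : Int))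
        (by omega) (by simp at hlen ⊢; omega) (by omega)
        (by rw [hget s (by omega)]; exact hPs)
        (by simpa using hgetk)
        (by intro j hj hjl
            rw [hget j (by omega)]
            exact hHigh j (by omega) (by simpa using hjl))
      refine ⟨?_, ?_, ?_, ?_⟩
      · rw [ih1]; simp
      · intro j hj
        rw [ih2 j (by omega), hget j (by omega)]
      · intro m hm
        match m with
        | 0 =>
          rw [show k + 0 = k by omega, ih2 k (by omega), hgetk]
          simp [rsAux, h]
        | m' + 1 =>
          rw [show k + (m' + 1) = (k + 1) + m' by omega, ih3 m' (by simp at hm; omega)]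
          simp [rsAux, h]
      · intro m hm
        match m with
        | 0 =>
          refine ⟨s, by simp [rsAux, h], by omega, ?_⟩
          rw [ih2 s (by omega), hget s (by omega)]
          exact hPs
        | m' + 1 =>
          obtain ⟨v, hv1, hv2, hv3⟩ := ih4 m' (by simp at hm; omega)
          exact ⟨v, by simpa [rsAux, h] using hv1, by omega, hv3⟩
    · -- gap: position k starts a new run
      have hstep : uStep (P, some e) ((k : Int), (a, b, i)) = (P, some b) := by
        simp [uStep, h]
      rw [hstep]
      obtain ⟨ih1, ih2, ih3, ih4⟩ := ih (k + 1) k b P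
        (by omega) (by simp at hlen ⊢; omega) (by omega)
        (hHigh k le_rfl hkP)
        (by simpa using hHigh k le_rfl hkP)
        (by intro j hj hjl; exact hHigh j (by omega) hjl)
      refine ⟨ih1, ?_, ?_, ?_⟩
      · intro j hj
        exact ih2 j (by omega)
      · intro m hm
        match m with
        | 0 =>
          rw [show k + 0 = k by omega, ih2 k (by omega)]
          rw [hHigh k le_rfl hkP]
          simp [rsAux, h]
        | m' + 1 =>
          rw [show k + (m' + 1) = (k + 1) + m' by omega, ih3 m' (by simp at hm; omega)]
          simp [rsAux, h]
      · intro m hm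
        match m with
        | 0 =>
          refine ⟨k, by simp [rsAux, h], by omega, ?_⟩
          rw [ih2 k (by omega)]
          exact hHigh k le_rfl hkP
        | m' + 1 =>
          obtain ⟨v, hv1, hv2, hv3⟩ := ih4 m' (by simp at hm; omega)
          exact ⟨v, by simpa [rsAux, h] using hv1, by omega, hv3⟩

-- the grouping loop splits the sorted order exactly at run-start changes = altGo runs
theorem group_loop (P : List Int) (rest : List (Int × Int × Int)) :
    ∀ (k s : Nat) (e : Int) (done : List (List Int)) (cur : List Int),
    (∀ m : Nat, m < rest.length →
      bFind P ((k + m : Nat) : Int) = (rsAux k s e rest).getD m 0) →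
    s < k →
    ((PySem.List.enumerate rest (k : Int)).foldl (gStep P) (done ++ [cur], (s : Int))).1
      = done ++ ((cur ++ (altSpan e rest).1) :: altGo (altSpan e rest).2.1) := by
  induction rest with
  | nil =>
    intro k s e done cur _ _
    simp [PySem.List.enumerate_nil, altSpan, altGo]
  | cons t rest ih =>
    intro k s e done cur hfind hsk
    obtain ⟨a, b, i⟩ := t
    have h0 := hfind 0 (by simp)
    rw [PySem.List.enumerate_cons, List.foldl_cons]
    by_cases h : a ≤ e
    · have hr : bFind P (k : Int) = (s : Int) := by
        simpa [rsAux, h] using h0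
      have hst : gStep P (done ++ [cur], (s : Int)) ((k : Int), (a, b, i))
          = (done ++ [cur ++ [i]], (s : Int)) := by
        simp [gStep, hr, PySem.List.pyGetD_neg_one_append_singleton]
      rw [hst]
      have hfind' : ∀ m : Nat, m < rest.length →
          bFind P ((k + 1 + m : Nat) : Int) = (rsAux (k + 1) s (max e b) rest).getD m 0 := by
        intro m hm
        have := hfind (m + 1) (by simpa using Nat.succ_lt_succ hm)
        rw [show k + (m + 1) = k + 1 + m by omega] at this
        simpa [rsAux, h] using this
      have := ih (k + 1) s (max e b) done (cur ++ [i]) hfind' (by omega)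
      rw [show ((k + 1 : Nat) : Int) = ((k : Int) + 1) by push_cast; ring] at this
      rw [this]
      simp [altSpan, h]
    · have hr : bFind P (k : Int) = (k : Int) := by
        simpa [rsAux, h] using h0
      have hst : gStep P (done ++ [cur], (s : Int)) ((k : Int), (a, b, i))
          = ((done ++ [cur]) ++ [[i]], (k : Int)) := by
        have hne : (k : Int) ≠ (s : Int) := by
          intro hc
          exact absurd (Int.ofNat_inj.mp hc) (by omega)
        simp [gStep, hr, hne]
      rw [hst]
      have hfind' : ∀ m : Nat, m < rest.length →
          bFind P ((k + 1 + m : Nat) : Int) = (rsAux (k + 1) k b rest).getD m 0 := by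
        intro m hm
        have := hfind (m + 1) (by simpa using Nat.succ_lt_succ hm)
        rw [show k + (m + 1) = k + 1 + m by omega] at this
        simpa [rsAux, h] using this
      have := ih (k + 1) k b (done ++ [cur]) [i] hfind' (by omega)
      rw [show ((k + 1 : Nat) : Int) = ((k : Int) + 1) by push_cast; ring] at this
      rw [this]
      simp [altSpan, h, altGo]

-- the runs produced by B's union-find grouping are exactly A's sweep runs
theorem assemble (L : List (Int × Int × Int)) (P0 : List Int)
    (hlen : P0.length = L.length)
    (hP0 : ∀ j : Nat, j < P0.length → P0.getD j 0 = (j : Int)) :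
    ((PySem.List.enumerate L 0).foldl
        (gStep (((PySem.List.enumerate L 0).foldl uStep (P0, none)).1)) ([], -1)).1
      = aFinish (L.foldl tStep ([], [], none)) := by
  match L with
  | [] => simp [PySem.List.enumerate_nil, aFinish]
  | (a0, b0, i0) :: rest =>
    have hn : P0.length = rest.length + 1 := by simpa using hlen
    rw [PySem.List.enumerate_cons]
    simp only [List.foldl_cons]
    rw [show ((0 : Int) + 1) = ((1 : Nat) : Int) by norm_num]
    have hstep0 : uStep (P0, none) ((0 : Int), (a0, b0, i0)) = (P0, some b0) := rfl
    rw [hstep0]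
    obtain ⟨u1, u2, u3, u4⟩ := union_inv rest 1 0 b0 P0
      (le_rfl) (by omega) (by omega)
      (hP0 0 (by omega)) (by simpa using hP0 0 (by omega))
      (fun j _ hj => hP0 j hj)
    set P' := ((PySem.List.enumerate rest ((1 : Nat) : Int)).foldl uStep (P0, some b0)).1 with hP'
    have hfind : ∀ m : Nat, m < rest.length →
        bFind P' ((1 + m : Nat) : Int) = (rsAux 1 0 b0 rest).getD m 0 := by
      intro m hm
      obtain ⟨v, hv1, hv2, hv3⟩ := u4 m hm
      have h3 := u3 m hm
      by_cases hv : v = 1 + m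
      · subst hv
        rw [bFind_self P' _ (by rw [PySem.List.pyGetD_natCast, h3, hv1]) (by omega)]
        rw [hv1]
      · rw [bFind_two P' _ ((v : Nat) : Int)
          (by rw [PySem.List.pyGetD_natCast, h3, hv1])
          (by intro hc; exact hv (Int.ofNat_inj.mp hc))
          (by rw [PySem.List.pyGetD_natCast]; exact hv3)
          (by omega)]
        rw [hv1]
    have hr0 : bFind P' 0 = 0 := by
      apply bFind_self
      · rw [show (0 : Int) = ((0 : Nat) : Int) by norm_num, PySem.List.pyGetD_natCast]
        have h2 := (u2 0 (by omega)).trans (hP0 0 (by omega))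
        simpa using h2
      · omega
    have hg0 : gStep P' (([] : List (List Int)), -1) ((0 : Int), (a0, b0, i0))
        = (([] : List (List Int)) ++ [[i0]], ((0 : Nat) : Int)) := by
      simp [gStep, hr0]
    rw [hg0]
    rw [group_loop P' rest 1 0 b0 [] [i0] hfind (by omega)]
    rw [show tStep ([], [], none) (a0, b0, i0) = ([], [i0], some b0) from rfl]
    rw [main_loop]

-- ===== VERDICT (by name: the statement is the Claim_ definition above) =====
theorem components_1d_py_spec : Claim_equal_components_1d_py := by
  intro intervals _
  unfold Spec_components_1d_py components_1d_py components_1d_py_alt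
  simp only [show bKey = aKey from rfl]
  rw [fold_eq_tStep]
  rw [union_fold_eq intervals _ _, group_fold_eq _ intervals _ _]
  rw [assemble]
  · simp [PySem.List.len_eq, PySem.List.length_pyRange_one]
  · intro j hj
    have hb : (j : Int) < (intervals.length : Int) := by
      simp [PySem.List.len_eq, PySem.List.length_pyRange_one] at hj
      omega
    rw [List.getD_eq_getElem _ _ (by simpa using hj)]
    rw [PySem.List.getElem_pyRange_one]
    simp
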